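-- pv_equiv track=rewrite | github.com/Stefanshi2019/ROB311 | rob311_winter_2021_project_01/bidirectional_search.py | check_intersect
-- ===== SOURCE A (Python) =====
-- def check_intersect(head_visited, tail_visited, head_front_size, tail_front_size):
--     dict_intersects = {}
--     optimal_cost = float('inf')
--     optimal_intersect = -1
--     path_found = 0
--     for state in head_visited:
--         if state in tail_visited:
--             cost = head_front_size[state] + tail_front_size[state]
--             dict_intersects[state] = cost
--             path_found += 1
--             # keep track of the intersection that results in optimal costs
--             if cost < optimal_cost:
--                 optimal_cost = cost
--                 optimal_intersect = state
--
--     return optimal_intersect, path_found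
-- ===== SOURCE B (Python) =====
-- def check_intersect(head_visited, tail_visited, head_front_size, tail_front_size):
--     common = [state for state in head_visited if state in tail_visited]
--     if not common:
--         return -1, 0
--     ranked = sorted(common, key=lambda s: head_front_size[s] + tail_front_size[s])
--     return ranked[0], len(common)
-- ===== Notes on version B (the rewrite author's own statement) =====
-- stated objective: alternative
-- what changed: Replaces A's single accumulating loop (running best cost, infinity sentinel, unused dict) by a staged pipeline: filter the intersection, STABLE-SORT it by summed frontier cost and take the first element of the sorted list (stability plus strict-< earliest-wins makes the sort head equal A's running minimum); the dead dict_intersects accumulator is dropped.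
import Mathlib
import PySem

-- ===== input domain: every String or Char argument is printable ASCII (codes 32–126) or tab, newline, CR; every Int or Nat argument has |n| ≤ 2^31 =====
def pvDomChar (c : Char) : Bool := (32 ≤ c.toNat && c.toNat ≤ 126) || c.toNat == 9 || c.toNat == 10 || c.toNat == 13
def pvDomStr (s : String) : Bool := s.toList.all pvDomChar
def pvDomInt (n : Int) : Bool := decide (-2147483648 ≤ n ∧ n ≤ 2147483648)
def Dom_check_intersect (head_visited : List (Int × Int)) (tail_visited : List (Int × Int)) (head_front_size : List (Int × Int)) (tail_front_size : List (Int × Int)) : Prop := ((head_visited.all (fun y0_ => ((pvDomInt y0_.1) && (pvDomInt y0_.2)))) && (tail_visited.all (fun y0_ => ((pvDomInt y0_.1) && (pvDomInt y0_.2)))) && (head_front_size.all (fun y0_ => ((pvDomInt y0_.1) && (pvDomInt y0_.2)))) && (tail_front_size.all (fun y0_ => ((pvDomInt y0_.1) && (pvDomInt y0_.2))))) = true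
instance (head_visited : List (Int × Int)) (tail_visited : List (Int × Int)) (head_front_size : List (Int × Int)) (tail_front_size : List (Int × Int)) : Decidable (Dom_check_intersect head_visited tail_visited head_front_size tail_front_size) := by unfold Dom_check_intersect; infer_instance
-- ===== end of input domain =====

-- B replaces A's single accumulating loop (running best, infinity sentinel, unused dict) by a staged
-- pipeline: filter the intersection, stable-sort it by summed frontier cost, take the first element.


-- ===== PORT A =====
-- Literal transliteration of A: one loop over the keys of head_visited threading
-- (dict_intersects, optimal_cost, optimal_intersect, path_found).
-- Python's float('inf') sentinel for optimal_cost is encoded as Option Int with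
-- none = inf (costs are ints, so 'cost < inf' is always true and exactly matches the none case).
-- head_front_size[state] / tail_front_size[state] would raise KeyError on a missing key;
-- Pre_check_intersect excludes those inputs, so getD 0 is exact on the admitted domain.
def check_intersect (head_visited : List (Int × Int)) (tail_visited : List (Int × Int)) (head_front_size : List (Int × Int)) (tail_front_size : List (Int × Int)) : Int × Int :=
  let tvD := PySem.Dict.ofList tail_visited
  let hfsD := PySem.Dict.ofList head_front_size
  let tfsD := PySem.Dict.ofList tail_front_size
  let r :=
    (PySem.Dict.ofList head_visited).keys.foldl
      (fun (acc : PySem.Dict Int Int × Option Int × Int × Int) state =>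
        if tvD.contains state then
          let cost := hfsD.getD state 0 + tfsD.getD state 0
          let di := acc.1.insert state cost
          let pf := acc.2.2.2 + 1
          match acc.2.1 with
          | none => (di, some cost, state, pf)
          | some oc => if cost < oc then (di, some cost, state, pf) else (di, acc.2.1, acc.2.2.1, pf)
        else acc)
      (PySem.Dict.empty, none, -1, 0)
  (r.2.2.1, r.2.2.2)

-- ===== PORT B =====
-- Staged pipeline: filter the intersection, stable-sort by cost, take the sorted head.
def check_intersect_alt (head_visited : List (Int × Int)) (tail_visited : List (Int × Int)) (head_front_size : List (Int × Int)) (tail_front_size : List (Int × Int)) : Int × Int :=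
  let tvD := PySem.Dict.ofList tail_visited
  let hfsD := PySem.Dict.ofList head_front_size
  let tfsD := PySem.Dict.ofList tail_front_size
  let common := (PySem.Dict.ofList head_visited).keys.filter (fun s => tvD.contains s)
  match PySem.List.sorted common (fun s => hfsD.getD s 0 + tfsD.getD s 0) with
  | [] => (-1, 0)
  | m :: _ => (m, (common.length : Int))

-- ===== PRECONDITION & SPEC =====
-- Pre_ excludes exactly the inputs on which the Python A raises KeyError: a state present in
-- both visited dicts but missing from head_front_size or tail_front_size.
def Pre_check_intersect (head_visited : List (Int × Int)) (tail_visited : List (Int × Int)) (head_front_size : List (Int × Int)) (tail_front_size : List (Int × Int)) : Prop :=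
  ∀ p ∈ head_visited, (∃ q ∈ tail_visited, q.1 = p.1) →
    (∃ r ∈ head_front_size, r.1 = p.1) ∧ (∃ r ∈ tail_front_size, r.1 = p.1)
instance (head_visited : List (Int × Int)) (tail_visited : List (Int × Int)) (head_front_size : List (Int × Int)) (tail_front_size : List (Int × Int)) : Decidable (Pre_check_intersect head_visited tail_visited head_front_size tail_front_size) := by unfold Pre_check_intersect; infer_instance

def pvWitness_check_intersect : (List (Int × Int)) × (List (Int × Int)) × (List (Int × Int)) × (List (Int × Int)) :=
  ([(1, 0), (2, 0)], [(1, 5)], [(1, 3)], [(1, 4)])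

def Spec_check_intersect (head_visited : List (Int × Int)) (tail_visited : List (Int × Int)) (head_front_size : List (Int × Int)) (tail_front_size : List (Int × Int)) (out : Int × Int) : Prop := out = check_intersect_alt head_visited tail_visited head_front_size tail_front_size
instance (head_visited : List (Int × Int)) (tail_visited : List (Int × Int)) (head_front_size : List (Int × Int)) (tail_front_size : List (Int × Int)) (out : Int × Int) : Decidable (Spec_check_intersect head_visited tail_visited head_front_size tail_front_size out) := by unfold Spec_check_intersect; infer_instance

-- ===== CLAIM (what is proved, stated in full; the proofs are below) =====
def Claim_equal_check_intersect : Prop := ∀ (head_visited : List (Int × Int)) (tail_visited : List (Int × Int)) (head_front_size : List (Int × Int)) (tail_front_size : List (Int × Int)), Dom_check_intersect head_visited tail_visited head_front_size tail_front_size → Pre_check_intersect head_visited tail_visited head_front_size tail_front_size → Spec_check_intersect head_visited tail_visited head_front_size tail_front_size (check_intersect head_visited tail_visited head_front_size tail_front_size)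

-- ===== LEMMAS AND PROOFS =====

-- A's (optimal_cost, optimal_intersect) pair viewed as an Option state: none = not found yet.
def pvEmb (key : Int → Int) : Option Int → Option Int × Int
  | none => (none, -1)
  | some m => (some (key m), m)

-- A's loop body (after filtering) simulates the running-first-minimum fold, one step at a time;
-- the counter just adds the length.
lemma pv_loop_proj (key : Int → Int) :
    ∀ (c : List Int) (d : PySem.Dict Int Int) (o : Option Int) (n : Int),
      (c.foldl
        (fun (acc : PySem.Dict Int Int × Option Int × Int × Int) state =>
          let cost := key state
          let di := acc.1.insert state cost
          let pf := acc.2.2.2 + 1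
          match acc.2.1 with
          | none => (di, some cost, state, pf)
          | some oc => if cost < oc then (di, some cost, state, pf) else (di, acc.2.1, acc.2.2.1, pf))
        (d, (pvEmb key o).1, (pvEmb key o).2, n)).2
      = ((pvEmb key (c.foldl
            (fun acc x => match acc with
              | none => some x
              | some m => if key x < key m then some x else some m) o)).1,
         (pvEmb key (c.foldl
            (fun acc x => match acc with
              | none => some x
              | some m => if key x < key m then some x else some m) o)).2,
         n + c.length) := by
  intro c
  induction c with
  | nil => intro d o n; simp
  | cons x t ih =>
    intro d o n
    cases o with
    | none =>
      simpa [pvEmb, List.foldl_cons, add_comm, add_left_comm, add_assoc] using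
        ih (d.insert x (key x)) (some x) (n + 1)
    | some m =>
      by_cases h : key x < key m
      · simpa [pvEmb, List.foldl_cons, h, add_comm, add_left_comm, add_assoc] using
          ih (d.insert x (key x)) (some x) (n + 1)
      · simpa [pvEmb, List.foldl_cons, h, add_comm, add_left_comm, add_assoc] using
          ih (d.insert x (key x)) (some m) (n + 1)

-- head of a stable insertion: x takes the head only if it is strictly smaller under the key.
lemma pv_head_insertBy (key : Int → Int) (x : Int) (ys : List Int) :
    (PySem.List.insertBy (fun a b => decide (key a < key b)) x ys).head? =
      some (match ys with
            | [] => x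
            | y :: _ => if key x < key y then x else y) := by
  cases ys with
  | nil => simp [PySem.List.insertBy]
  | cons y t =>
    by_cases h : key x < key y <;> simp [PySem.List.insertBy, h]

-- head of the stable insertion sort = the running-first-minimum fold.
lemma pv_head_sorted_fold (key : Int → Int) :
    ∀ (xs : List Int) (acc : List Int),
      (xs.foldl (fun acc x => PySem.List.insertBy (fun a b => decide (key a < key b)) x acc) acc).head?
      = xs.foldl
          (fun (o : Option Int) x => match o with
            | none => some x
            | some m => if key x < key m then some x else some m)
          acc.head? := by
  intro xs
  induction xs with
  | nil => intro acc; rfl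
  | cons x t ih =>
    intro acc
    rw [List.foldl_cons, List.foldl_cons, ih, pv_head_insertBy]
    cases acc with
    | nil => rfl
    | cons y ys => by_cases h : key x < key y <;> simp [h]

-- Combining the two: A's loop over the common list returns (sorted head or -1, length).
lemma pv_main (key : Int → Int) (c : List Int) :
    ((c.foldl
        (fun (acc : PySem.Dict Int Int × Option Int × Int × Int) state =>
          let cost := key state
          let di := acc.1.insert state cost
          let pf := acc.2.2.2 + 1
          match acc.2.1 with
          | none => (di, some cost, state, pf)
          | some oc => if cost < oc then (di, some cost, state, pf) else (di, acc.2.1, acc.2.2.1, pf))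
        (PySem.Dict.empty, none, -1, 0)).2.2.1,
     (c.foldl
        (fun (acc : PySem.Dict Int Int × Option Int × Int × Int) state =>
          let cost := key state
          let di := acc.1.insert state cost
          let pf := acc.2.2.2 + 1
          match acc.2.1 with
          | none => (di, some cost, state, pf)
          | some oc => if cost < oc then (di, some cost, state, pf) else (di, acc.2.1, acc.2.2.1, pf))
        (PySem.Dict.empty, none, -1, 0)).2.2.2)
    = match PySem.List.sorted c key with
      | [] => (-1, 0)
      | m :: _ => (m, (c.length : Int)) := by
  have h := pv_loop_proj key c PySem.Dict.empty none 0
  have hhead : (PySem.List.sorted c key).head?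
      = c.foldl
          (fun (o : Option Int) x => match o with
            | none => some x
            | some m => if key x < key m then some x else some m) none := by
    rw [PySem.List.sorted_eq_foldl_insertBy, pv_head_sorted_fold]
    rfl
  cases hs : PySem.List.sorted c key with
  | nil =>
    have hc : c = [] := (PySem.List.sorted_eq_nil_iff ..).mp hs
    subst hc
    simp
  | cons m t =>
    rw [hs] at hhead
    rw [← hhead] at h
    simp only [List.head?_cons, pvEmb] at h
    simp [h]

-- ===== VERDICT (by name: the statement is the Claim_ definition above) =====
theorem check_intersect_spec : Claim_equal_check_intersect := by
  intro hv tv hfs tfs _hdom _hpre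
  unfold Spec_check_intersect check_intersect check_intersect_alt
  dsimp only
  rw [← List.foldl_filter
      (p := fun s => (PySem.Dict.ofList tv).contains s)]
  exact pv_main
    (fun s => (PySem.Dict.ofList hfs).getD s 0 + (PySem.Dict.ofList tfs).getD s 0)
    ((PySem.Dict.ofList hv).keys.filter (fun s => (PySem.Dict.ofList tv).contains s))
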